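-- pv_equiv track=rewrite | github.com/mombasawalafaizan/dsa_solution | Bit Manipulation/powerSet.py | AllPossibleStrings
-- ===== SOURCE A (Python) =====
-- def AllPossibleStrings(s):
--     subsets = []
--     n = len(s)
--     for counter in range(1, 2**n):
--         subset = ''
--         for j in range(n):
--             if (1<<j) & counter:
--                 subset += s[j]
--         subsets.append(subset)
--     # subsets.sort()
--     return subsets
-- ===== SOURCE B (Python) =====
-- def AllPossibleStrings(s):
--     subsets = ['']
--     for ch in s:
--         subsets += [x + ch for x in subsets]
--     return subsets[1:]
-- ===== Notes on version B (the rewrite author's own statement) =====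
-- stated objective: simpler
-- what changed: Replaces the bitmask counter with nested index loop by incremental doubling over the characters (subsets += [x + ch for x in subsets]), then drops the leading empty subset; no bit operations or index loops.
import Mathlib
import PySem

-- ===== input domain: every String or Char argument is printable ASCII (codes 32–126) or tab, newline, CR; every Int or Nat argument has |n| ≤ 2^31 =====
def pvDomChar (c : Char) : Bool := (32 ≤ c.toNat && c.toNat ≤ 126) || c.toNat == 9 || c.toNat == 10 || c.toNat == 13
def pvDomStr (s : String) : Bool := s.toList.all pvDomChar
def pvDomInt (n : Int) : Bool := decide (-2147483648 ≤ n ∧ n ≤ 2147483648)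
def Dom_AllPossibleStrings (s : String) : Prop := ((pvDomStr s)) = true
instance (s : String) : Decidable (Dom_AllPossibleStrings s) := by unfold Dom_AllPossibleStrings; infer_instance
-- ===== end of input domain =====

-- B replaces the bitmask-counter enumeration with incremental doubling over the characters (simpler: no bit operations, no inner index loop); same output, same order.

-- ===== PORT A =====
-- Strings are handled as List Char (PySem convention); s[j] is PySem.List.pyGetD (j always in range here),
-- range(...) is PySem.List.pyRange, 1<<j is (1:Int) <<< j.toNat (j ≥ 0 in range(n)), & is PySem.Int.band.
def AllPossibleStrings (s : String) : List String :=
  let cs := s.toList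
  let n := cs.length
  (PySem.List.pyRange 1 ((2:Int)^n) 1).foldl
    (fun subsets counter =>
      subsets ++ [String.ofList (
        (PySem.List.pyRange 0 (n:Int) 1).foldl
          (fun subset j =>
            if PySem.Int.band ((1:Int) <<< j.toNat) counter ≠ 0 then
              subset ++ [PySem.List.pyGetD cs j ' ']
            else subset) [])]) []

-- ===== PORT B =====
-- The loop accumulates subsets as List (List Char); the final subsets[1:] is PySem.List.slice … 1 none.
def AllPossibleStrings_alt (s : String) : List String :=
  let subsets := s.toList.foldl
    (fun subsets ch => subsets ++ subsets.map (fun x => x ++ [ch])) [([] : List Char)]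
  PySem.List.slice (subsets.map String.ofList) (some 1) none

-- ===== PRECONDITION & SPEC =====
def Spec_AllPossibleStrings (s : String) (out : List String) : Prop := out = AllPossibleStrings_alt s
instance (s : String) (out : List String) : Decidable (Spec_AllPossibleStrings s out) := by unfold Spec_AllPossibleStrings; infer_instance

-- ===== CLAIM (what is proved, stated in full; the proofs are below) =====
def Claim_equal_AllPossibleStrings : Prop := ∀ (s : String), Dom_AllPossibleStrings s → Spec_AllPossibleStrings s (AllPossibleStrings s)

-- ===== LEMMAS AND PROOFS =====

-- The subset of cs selected by the low bits of c (bit j picks cs[j]).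
def gBits : List Char → Nat → List Char
  | [], _ => []
  | a :: t, c => (if c % 2 = 1 then [a] else []) ++ gBits t (c / 2)

lemma gBits_append_lt (t : List Char) (a : Char) :
    ∀ c, c < 2 ^ t.length → gBits (t ++ [a]) c = gBits t c := by
  induction t with
  | nil =>
      intro c hc
      have hc0 : c = 0 := by simpa using hc
      subst hc0; simp [gBits]
  | cons b t ih =>
      intro c hc
      simp only [List.cons_append, gBits, List.length_cons] at *
      rw [ih (c / 2) (by rw [pow_succ] at hc; omega)]

lemma gBits_append_ge (t : List Char) (a : Char) :
    ∀ d, d < 2 ^ t.length → gBits (t ++ [a]) (2 ^ t.length + d) = gBits t d ++ [a] := by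
  induction t with
  | nil =>
      intro d hd
      have hd0 : d = 0 := by simpa using hd
      subst hd0; simp [gBits]
  | cons b t ih =>
      intro d hd
      simp only [List.cons_append, gBits, List.length_cons] at *
      have h2 : (0:Nat) < 2 ^ t.length := Nat.two_pow_pos _
      have hm : (2 ^ (t.length + 1) + d) % 2 = d % 2 := by rw [pow_succ]; omega
      have hdd : (2 ^ (t.length + 1) + d) / 2 = 2 ^ t.length + d / 2 := by rw [pow_succ]; omega
      rw [hm, hdd, ih (d / 2) (by rw [pow_succ] at hd; omega), List.append_assoc]

-- B's doubling loop produces exactly the bitmask subsets in counter order 0, 1, …, 2^n − 1.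
lemma foldl_double (cs : List Char) :
    cs.foldl (fun subsets ch => subsets ++ subsets.map (fun x => x ++ [ch])) [([] : List Char)]
      = (List.range (2 ^ cs.length)).map (gBits cs) := by
  induction cs using List.reverseRecOn with
  | nil => simp [gBits]
  | append_singleton t a ih =>
      rw [List.foldl_append]
      simp only [List.foldl_cons, List.foldl_nil, ih]
      have hlen : 2 ^ (t ++ [a]).length = 2 ^ t.length + 2 ^ t.length := by
        simp [pow_succ]; ring
      rw [hlen, List.range_add, List.map_append, List.map_map, List.map_map]
      congr 1
      · exact List.map_congr_left (fun c hc =>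
          (gBits_append_lt t a c (List.mem_range.mp hc)).symm)
      · exact List.map_congr_left (fun d hd =>
          (gBits_append_ge t a d (List.mem_range.mp hd)).symm)

-- A's inner loop over range(n) computes the bitmask subset gBits.
lemma foldl_inner (cs : List Char) : ∀ (m : Nat) (acc : List Char),
    (List.range cs.length).foldl
      (fun subset j => if Nat.testBit m j then subset ++ [cs.getD j ' '] else subset) acc
      = acc ++ gBits cs m := by
  induction cs with
  | nil => intro m acc; simp [gBits]
  | cons a t ih =>
      intro m acc
      rw [List.length_cons, List.range_succ_eq_map, List.foldl_cons, List.foldl_map]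
      have hstep : (fun (subset : List Char) (j : Nat) =>
          if Nat.testBit m j.succ then subset ++ [(a :: t).getD j.succ ' '] else subset)
          = (fun subset j => if Nat.testBit (m / 2) j then subset ++ [t.getD j ' '] else subset) := by
        funext subset j
        rw [Nat.succ_eq_add_one, Nat.testBit_add_one, List.getD_cons_succ]
      rw [hstep, ih (m / 2), Nat.testBit_zero, gBits]
      by_cases h : m % 2 = 1 <;> simp [h]

-- the bit test (1 << j) & m ≠ 0 is testBit
lemma band_shift_test (j m : Nat) :
    (PySem.Int.band ((1:Int) <<< (j : Int)) (m : Int) ≠ 0) ↔ Nat.testBit m j = true := by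
  have h1 : (1:Int) <<< (j : Int) = ((2 ^ j : Nat) : Int) := Int.one_shiftLeft j
  rw [h1, PySem.Int.band_natCast]
  rw [Nat.two_pow_and]
  cases h : Nat.testBit m j
  · simp
  · simp [h]

-- A's inner loop, in its ported form over pyRange with Int indices.
lemma innerA (cs : List Char) (m : Nat) :
    (PySem.List.pyRange 0 (cs.length : Int) 1).foldl
      (fun subset j =>
        if PySem.Int.band ((1:Int) <<< j.toNat) ((m : Nat) : Int) ≠ 0 then
          subset ++ [PySem.List.pyGetD cs j ' ']
        else subset) []
      = gBits cs m := by
  rw [PySem.List.pyRange_zero_nat, List.foldl_map]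
  have hstep : (fun (subset : List Char) (k : Nat) =>
      if PySem.Int.band ((1:Int) <<< ((((k : Int)).toNat : Nat) : Int)) ((m : Nat) : Int) ≠ 0 then
        subset ++ [PySem.List.pyGetD cs (k : Int) ' ']
      else subset)
      = (fun subset j => if Nat.testBit m j then subset ++ [cs.getD j ' '] else subset) := by
    funext subset k
    rw [Int.toNat_natCast, PySem.List.pyGetD_natCast]
    by_cases h : Nat.testBit m k = true
    · rw [if_pos ((band_shift_test k m).mpr h), if_pos h]
    · rw [if_neg (fun hc => h ((band_shift_test k m).mp hc)), if_neg h]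
  rw [hstep]
  simpa using foldl_inner cs m []

-- ===== VERDICT (by name: the statement is the Claim_ definition above) =====
theorem AllPossibleStrings_spec : Claim_equal_AllPossibleStrings := by
  intro s _
  unfold Spec_AllPossibleStrings AllPossibleStrings AllPossibleStrings_alt
  simp only []
  set cs := s.toList with hcs
  set n := cs.length with hn
  -- A side: outer foldl is a map over the counter range
  rw [PySem.List.foldl_append_singleton_eq_map, List.nil_append]
  -- B side
  rw [foldl_double, PySem.List.slice_from _ (by norm_num)]
  have hpos : (0:Nat) < 2 ^ n := Nat.two_pow_pos _
  -- counter range 1 … 2^n − 1 as a Nat range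
  rw [PySem.List.pyRange_one 1 ((2:Int)^n)]
  have htoNat : ((2:Int) ^ n - 1).toNat = 2 ^ n - 1 := by
    have : ((2:Int) ^ n) = ((2 ^ n : Nat) : Int) := by push_cast; ring
    omega
  rw [htoNat]
  -- B side: drop 1 of range (2^n)
  have hrange : List.range (2 ^ n) = 0 :: List.map Nat.succ (List.range (2 ^ n - 1)) := by
    conv_lhs => rw [show 2 ^ n = (2 ^ n - 1) + 1 by omega]
    exact List.range_succ_eq_map
  rw [hrange]
  simp only [List.map_cons, List.map_map, Int.toNat_one, List.drop_succ_cons, List.drop_zero,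
    List.map_map]
  apply List.ext_getElem (by simp) (fun i h1 h2 => ?_)
  simp only [List.getElem_map, List.getElem_range, Function.comp_apply]
  have hcast : (1:Int) + ((i : Nat) : Int) = (((1 + i : Nat)) : Int) := by push_cast; ring
  rw [hcast, innerA cs (1 + i)]
  rw [Nat.succ_eq_add_one, Nat.add_comm i 1]
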